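-- pv_equiv track=rewrite | github.com/cocoon333/lintcode | 1615_solution.py | getAns
-- ===== SOURCE A (Python) =====
-- def getAns(funds, a, b, c):
--     for i in range(len(funds)):
--         minimum = min(a, b, c)
--         if minimum == a:
--             a += funds[i]
--         elif minimum == b:
--             b += funds[i]
--         else:
--             c += funds[i]
--
--     return [a, b, c]
-- ===== SOURCE B (Python) =====
-- def getAns(funds, a, b, c):
--     def ins(h, p):
--         if not h or p <= h[0]:
--             return [p] + h
--         return [h[0]] + ins(h[1:], p)
--
--     heap = ins(ins(ins([], (c, 2)), (b, 1)), (a, 0))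
--     for f in funds:
--         (v, i), rest = heap[0], heap[1:]
--         heap = ins(rest, (v + f, i))
--     res = [0, 0, 0]
--     for v, i in heap:
--         res[i] = v
--     return res
-- ===== Notes on version B (the rewrite author's own statement) =====
-- stated objective: alternative
-- what changed: Replaces the per-step min-of-three scan over the named variables a,b,c with a sorted priority list of (value, index) pairs: each fund is added to the popped front pair which is re-inserted in order, and the final values are scattered back by index.
import Mathlib
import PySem

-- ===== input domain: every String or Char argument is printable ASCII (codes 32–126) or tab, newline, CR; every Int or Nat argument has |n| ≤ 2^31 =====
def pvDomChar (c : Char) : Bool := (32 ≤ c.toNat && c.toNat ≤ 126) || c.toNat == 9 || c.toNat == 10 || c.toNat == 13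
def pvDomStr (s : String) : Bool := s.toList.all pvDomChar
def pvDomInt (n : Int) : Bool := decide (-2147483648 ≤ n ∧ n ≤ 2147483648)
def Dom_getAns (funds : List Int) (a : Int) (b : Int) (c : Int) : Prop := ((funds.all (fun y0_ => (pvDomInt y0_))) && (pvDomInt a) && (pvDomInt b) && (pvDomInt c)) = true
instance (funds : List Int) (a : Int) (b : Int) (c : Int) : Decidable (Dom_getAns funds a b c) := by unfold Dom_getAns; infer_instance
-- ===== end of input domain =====

-- B replaces the per-step min-of-three scan with a sorted priority list of (value, index) pairs
-- popped/reinserted per fund (objective: alternative decomposition, same cost).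


-- ===== PORT A =====
-- one loop iteration of A: add f to the first variable holding min(a,b,c)
def aStep (st : Int × Int × Int) (f : Int) : Int × Int × Int :=
  let a := st.1; let b := st.2.1; let c := st.2.2
  let minimum := min a (min b c)   -- Python min(a,b,c)
  if minimum = a then (a + f, b, c)
  else if minimum = b then (a, b + f, c)
  else (a, b, c + f)

def getAns (funds : List Int) (a : Int) (b : Int) (c : Int) : List Int :=
  let s := funds.foldl aStep (a, b, c)
  [s.1, s.2.1, s.2.2]

-- ===== PORT B =====
-- Python tuple comparison p <= q on (value, index) pairs (lexicographic)
def lexLe (p q : Int × Int) : Bool := p.1 < q.1 || (p.1 = q.1 && p.2 ≤ q.2)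

-- B's helper ins: insert a pair into a sorted list, keeping it sorted
def insS : List (Int × Int) → (Int × Int) → List (Int × Int)
  | [], p => [p]
  | q :: t, p => if lexLe p q then p :: q :: t else q :: insS t p

-- one loop iteration of B: pop the front pair, add f, re-insert
def bStep (h : List (Int × Int)) (f : Int) : List (Int × Int) :=
  match h with
  | (v, i) :: rest => insS rest (v + f, i)
  | [] => []   -- unreachable: the heap always has 3 elements (totality guard only)

def getAns_alt (funds : List Int) (a : Int) (b : Int) (c : Int) : List Int :=
  let heap0 := insS (insS (insS [] (c, 2)) (b, 1)) (a, 0)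
  let heap := funds.foldl bStep heap0
  -- res = [0,0,0]; for v, i in heap: res[i] = v   (i is one of our own literals 0,1,2, so .toNat is exact)
  heap.foldl (fun res (p : Int × Int) => res.set p.2.toNat p.1) [0, 0, 0]

-- ===== PRECONDITION & SPEC =====
def Spec_getAns (funds : List Int) (a : Int) (b : Int) (c : Int) (out : List Int) : Prop := out = getAns_alt funds a b c
instance (funds : List Int) (a : Int) (b : Int) (c : Int) (out : List Int) : Decidable (Spec_getAns funds a b c out) := by unfold Spec_getAns; infer_instance

-- ===== CLAIM (what is proved, stated in full; the proofs are below) =====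
def Claim_equal_getAns : Prop := ∀ (funds : List Int) (a : Int) (b : Int) (c : Int), Dom_getAns funds a b c → Spec_getAns funds a b c (getAns funds a b c)

-- ===== LEMMAS AND PROOFS =====

-- B's initial heap: the three indexed pairs, sorted
def sort3 (a b c : Int) : List (Int × Int) :=
  insS (insS (insS [] (c, 2)) (b, 1)) (a, 0)

lemma bStep_sort3 (a b c f : Int) :
    bStep (sort3 a b c) f = sort3 (aStep (a, b, c) f).1 (aStep (a, b, c) f).2.1 (aStep (a, b, c) f).2.2 := by
  simp only [sort3, aStep, min_def]
  repeat' (first | omega | split_ifs | simp_all [insS, lexLe, bStep])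

lemma foldl_sort3 (funds : List Int) (a b c : Int) :
    funds.foldl bStep (sort3 a b c) =
      sort3 (funds.foldl aStep (a, b, c)).1 (funds.foldl aStep (a, b, c)).2.1 (funds.foldl aStep (a, b, c)).2.2 := by
  induction funds generalizing a b c with
  | nil => rfl
  | cons f t ih =>
      simp only [List.foldl_cons, bStep_sort3]
      exact ih _ _ _

lemma readout_sort3 (a b c : Int) :
    (sort3 a b c).foldl (fun res (p : Int × Int) => res.set p.2.toNat p.1) [0, 0, 0] = [a, b, c] := by
  simp only [sort3]
  repeat' (first | omega | split_ifs | simp_all [insS, lexLe, List.foldl])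

-- ===== VERDICT (by name: the statement is the Claim_ definition above) =====
theorem getAns_spec : Claim_equal_getAns := by
  intro funds a b c _
  show getAns funds a b c = getAns_alt funds a b c
  simp only [getAns, getAns_alt]
  rw [show insS (insS (insS [] (c, 2)) (b, 1)) (a, 0) = sort3 a b c from rfl,
      foldl_sort3, readout_sort3]
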